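-- pv_equiv track=rewrite | github.com/cohky16/atcoder | abc259/abc259_c/main.py | solve
-- ===== SOURCE A (Python) =====
-- YES = 'Yes'
--
-- NO = 'No'
--
-- def solve(S, T):
--     if len(S) > len(T) or S[0] != T[0] or S[-1] != T[-1]: return NO
--     l = []
--     p = ""
--     for c in list(S):
--         if p == c: l[-1] += 1
--         else: l.append(1)
--         p = c
--     ll = []
--     p = ""
--     for c in list(T):
--         if p == c: ll[-1] += 1
--         else: ll.append(1)
--         p = c
--     if len(l) != len(ll): return NO
--     ss = 0
--     tt = 0
--     for s,t in zip(l, ll):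
--         ss += s
--         tt += t
--         if s > t or (s == 1 and t > s) or S[ss-1] != T[tt-1]: return NO
--     return YES
-- ===== SOURCE B (Python) =====
-- def solve(S, T):
--     i = j = 0
--     n, m = len(S), len(T)
--     while i < n and j < m:
--         c = S[i]
--         if T[j] != c:
--             return 'No'
--         s = 0
--         while i < n and S[i] == c:
--             i += 1
--             s += 1
--         t = 0
--         while j < m and T[j] == c:
--             j += 1
--             t += 1
--         if s > t or (s == 1 and t > 1):
--             return 'No'
--     return 'Yes' if i == n and j == m else 'No'
-- ===== Notes on version B (the rewrite author's own statement) =====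
-- stated objective: simpler
-- what changed: A builds two run-length lists in separate passes and then walks a zip of them with cumulative-index arithmetic back into the strings; B does one simultaneous two-pointer scan of both strings, comparing each run's character and length on the fly, with no intermediate lists.
import Mathlib
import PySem

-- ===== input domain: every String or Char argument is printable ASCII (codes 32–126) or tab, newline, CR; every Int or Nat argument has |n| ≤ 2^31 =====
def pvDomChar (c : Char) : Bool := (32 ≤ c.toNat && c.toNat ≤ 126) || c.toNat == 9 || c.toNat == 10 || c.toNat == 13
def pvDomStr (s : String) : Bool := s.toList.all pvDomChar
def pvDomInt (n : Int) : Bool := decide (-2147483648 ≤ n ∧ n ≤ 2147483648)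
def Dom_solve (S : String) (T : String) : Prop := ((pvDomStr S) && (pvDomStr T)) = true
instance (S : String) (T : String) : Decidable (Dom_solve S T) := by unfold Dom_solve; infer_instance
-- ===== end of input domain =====

-- B replaces A's three passes (run-length lists for S and T, then an index-arithmetic zip loop)
-- by one simultaneous two-pointer scan over both strings; objective: simpler, same asymptotic cost.

-- ===== PORT A =====
def pvYES : String := "Yes"
def pvNO : String := "No"

-- A: `l[-1] += 1` (increment last element; the empty case is unreachable in A since p just matched)
def pvIncLast : List Int → List Int
  | [] => []
  | [k] => [k + 1]
  | x :: xs => x :: pvIncLast xs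

-- A: one run-length-building loop (state (l, p); Python's initial p = "" never equals a char ↦ none)
def pvRL (cs : List Char) : List Int × Option Char :=
  cs.foldl (fun st c => if st.2 = some c then (pvIncLast st.1, some c) else (st.1 ++ [(1 : Int)], some c)) ([], none)

-- A: the `for s,t in zip(l, ll)` loop with early return (`ss += s` folded into ss')
def pvZipLoop (S T : List Char) : List (Int × Int) → Int → Int → String
  | [], _, _ => pvYES
  | (s, t) :: rest, ss, tt =>
      let ss' := ss + s
      let tt' := tt + t
      if s > t ∨ (s = 1 ∧ t > s) ∨ PySem.List.pyGet? S (ss' - 1) ≠ PySem.List.pyGet? T (tt' - 1) then pvNO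
      else pvZipLoop S T rest ss' tt'

-- Python's S[0] / S[-1] raise IndexError when S = "" (excluded by Pre_solve); pyGet? is none there
def solve (S : String) (T : String) : String :=
  let s := S.toList
  let t := T.toList
  if s.length > t.length ∨ PySem.List.pyGet? s 0 ≠ PySem.List.pyGet? t 0 ∨
      PySem.List.pyGet? s (-1) ≠ PySem.List.pyGet? t (-1) then pvNO
  else
    let l := (pvRL s).1
    let ll := (pvRL t).1
    if l.length ≠ ll.length then pvNO
    else pvZipLoop s t (l.zip ll) 0 0

-- ===== PORT B =====
-- B: the inner `while … == c` counting loop, returning (run length, rest)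
def pvRun (c : Char) : List Char → Nat × List Char
  | [] => (0, [])
  | x :: xs => if x = c then ((pvRun c xs).1 + 1, (pvRun c xs).2) else (0, x :: xs)

theorem pvRun_len_le (c : Char) : ∀ xs : List Char, (pvRun c xs).2.length ≤ xs.length := by
  intro xs
  induction xs with
  | nil => simp [pvRun]
  | cons x xs ih =>
    by_cases h : x = c <;> simp [pvRun, h]
    omega

-- B: the outer while loop on the two remaining suffixes
def pvScan : List Char → List Char → String
  | [], [] => pvYES
  | [], _ :: _ => pvNO
  | _ :: _, [] => pvNO
  | c :: s, d :: t =>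
      if d ≠ c then pvNO
      else
        let rs := pvRun c (c :: s)
        let rt := pvRun c (d :: t)
        if rt.1 < rs.1 ∨ (rs.1 = 1 ∧ 1 < rt.1) then pvNO
        else pvScan rs.2 rt.2
  termination_by s _ => s.length
  decreasing_by
    simp only [pvRun]
    simp only [List.length_cons]
    exact Nat.lt_succ_of_le (pvRun_len_le c s)

def solve_alt (S : String) (T : String) : String := pvScan S.toList T.toList

-- ===== PRECONDITION & SPEC =====
-- Pre_ excludes exactly S = "", where Python A raises IndexError at S[0]
def Pre_solve (S : String) (T : String) : Prop := S ≠ ""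
instance (S : String) (T : String) : Decidable (Pre_solve S T) := by unfold Pre_solve; infer_instance
def pvWitness_solve : String × String := ("ab", "aabb")

def Spec_solve (S : String) (T : String) (out : String) : Prop := out = solve_alt S T
instance (S : String) (T : String) (out : String) : Decidable (Spec_solve S T out) := by unfold Spec_solve; infer_instance

-- ===== CLAIM (what is proved, stated in full; the proofs are below) =====
def Claim_equal_solve : Prop := ∀ (S : String) (T : String), Dom_solve S T → Pre_solve S T → Spec_solve S T (solve S T)

-- ===== LEMMAS AND PROOFS =====

-- canonical run decomposition, the common reference point of both proofs
def pvRunsAux : Char → Nat → List Char → List (Char × Nat)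
  | c, k, [] => [(c, k)]
  | c, k, x :: xs => if x = c then pvRunsAux c (k + 1) xs else (c, k) :: pvRunsAux x 1 xs

def pvRuns : List Char → List (Char × Nat)
  | [] => []
  | c :: xs => pvRunsAux c 1 xs

def pvCheck : List (Char × Nat) → List (Char × Nat) → String
  | [], [] => pvYES
  | [], _ :: _ => pvNO
  | _ :: _, [] => pvNO
  | (c, s) :: rs, (d, t) :: rt =>
      if c ≠ d ∨ t < s ∨ (s = 1 ∧ 1 < t) then pvNO else pvCheck rs rt

def pvFlat (rs : List (Char × Nat)) : List Char := rs.flatMap (fun r => List.replicate r.2 r.1)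

theorem pvRunsAux_eq_run (c : Char) : ∀ (xs : List Char) (k : Nat),
    pvRunsAux c k xs = (c, k + (pvRun c xs).1) :: pvRuns (pvRun c xs).2 := by
  intro xs
  induction xs with
  | nil => intro k; simp [pvRunsAux, pvRun, pvRuns]
  | cons x xs ih =>
    intro k
    by_cases h : x = c
    · subst h
      rw [pvRunsAux, if_pos rfl, ih (k + 1), pvRun, if_pos rfl]
      simp only []
      have : k + 1 + (pvRun x xs).1 = k + ((pvRun x xs).1 + 1) := by omega
      rw [this]
    · rw [pvRunsAux, if_neg h, pvRun, if_neg h]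
      simp [pvRuns]

theorem pvScan_eq_check : ∀ s t : List Char, pvScan s t = pvCheck (pvRuns s) (pvRuns t) := by
  intro s t
  fun_induction pvScan s t with
  | case1 => rfl
  | case2 x xs => rw [pvRuns, pvRuns, pvRunsAux_eq_run]; rfl
  | case3 x xs => rw [pvRuns, pvRuns, pvRunsAux_eq_run]; rfl
  | case4 c s d t hne =>
    rw [pvRuns, pvRuns, pvRunsAux_eq_run, pvRunsAux_eq_run, pvCheck,
      if_pos (Or.inl (fun h => hne h.symm))]
  | case5 c s d t hne rs rt hcond =>
    have hdc : d = c := not_not.mp hne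
    subst hdc
    rw [pvRuns, pvRuns, pvRunsAux_eq_run, pvRunsAux_eq_run, pvCheck, if_pos]
    simp only [rs, rt, pvRun, if_true] at hcond
    right
    rcases hcond with h | ⟨h1, h2⟩
    · left; omega
    · right; exact ⟨by omega, by omega⟩
  | case6 c s d t hne rs rt hcond ih =>
    have hdc : d = c := not_not.mp hne
    subst hdc
    simp only [rs, rt, pvRun, if_true] at hcond ih ⊢
    rw [ih, pvRuns, pvRuns, pvRunsAux_eq_run, pvRunsAux_eq_run, pvCheck, if_neg]
    intro h
    rcases h with h | h | ⟨h1, h2⟩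
    · exact h rfl
    · exact hcond (Or.inl (by omega))
    · exact hcond (Or.inr ⟨by omega, by omega⟩)

theorem pvIncLast_append : ∀ (acc : List Int) (k : Int), pvIncLast (acc ++ [k]) = acc ++ [k + 1]
  | [], k => by simp [pvIncLast]
  | [x], k => by simp [pvIncLast]
  | x :: y :: ys, k => by
      have h := pvIncLast_append (y :: ys) k
      simp only [List.cons_append] at h ⊢
      rw [pvIncLast]
      · rw [h]
      · simp

theorem pvFoldA : ∀ (xs : List Char) (acc : List Int) (k : Nat) (c : Char),
    (xs.foldl (fun st c => if st.2 = some c then (pvIncLast st.1, some c) else (st.1 ++ [(1 : Int)], some c)) (acc ++ [(k : Int)], some c)).1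
      = acc ++ (pvRunsAux c k xs).map (fun r => (r.2 : Int)) := by
  intro xs
  induction xs with
  | nil => intro acc k c; simp [pvRunsAux]
  | cons x xs ih =>
    intro acc k c
    by_cases h : x = c
    · subst h
      simp only [List.foldl_cons, pvIncLast_append, pvRunsAux]
      rw [show ((k : Int) + 1) = ((k + 1 : Nat) : Int) by push_cast; ring]
      exact ih acc (k + 1) x
    · have hne : ¬ ((some c : Option Char) = some x) := by
        intro hh; exact h (Option.some.inj hh).symm
      simp only [List.foldl_cons, if_neg hne, pvRunsAux, if_neg h]
      rw [show acc ++ [(k : Int)] ++ [(1 : Int)] = (acc ++ [(k : Int)]) ++ [((1 : Nat) : Int)] by simp]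
      rw [ih (acc ++ [(k : Int)]) 1 x]
      simp

theorem pvRL_eq : ∀ xs : List Char, (pvRL xs).1 = (pvRuns xs).map (fun r => (r.2 : Int)) := by
  intro xs
  cases xs with
  | nil => simp [pvRL, pvRuns]
  | cons x xs =>
    have h0 : ¬ ((none : Option Char) = some x) := by simp
    simp only [pvRL, List.foldl_cons, if_neg h0, List.nil_append]
    have := pvFoldA xs [] 1 x
    simpa [pvRL, pvRuns] using this

theorem pvFlat_runsAux : ∀ (xs : List Char) (c : Char) (k : Nat),
    pvFlat (pvRunsAux c k xs) = List.replicate k c ++ xs := by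
  intro xs
  induction xs with
  | nil => intro c k; simp [pvRunsAux, pvFlat]
  | cons x xs ih =>
    intro c k
    by_cases h : x = c
    · subst h
      rw [pvRunsAux, if_pos rfl, ih x (k + 1)]
      simp [List.replicate_succ']
    · simp only [pvRunsAux, if_neg h, pvFlat, List.flatMap_cons]
      have := ih x 1
      simp only [pvFlat] at this
      simp [this]

theorem pvFlat_runs (xs : List Char) : pvFlat (pvRuns xs) = xs := by
  cases xs with
  | nil => simp [pvRuns, pvFlat]
  | cons x xs => simp [pvRuns, pvFlat_runsAux]

theorem pvRunsAux_pos : ∀ (xs : List Char) (c : Char) (k : Nat), 1 ≤ k →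
    ∀ r ∈ pvRunsAux c k xs, 1 ≤ r.2 := by
  intro xs
  induction xs with
  | nil => intro c k hk r hr; simp [pvRunsAux] at hr; subst hr; simpa
  | cons x xs ih =>
    intro c k hk r hr
    by_cases h : x = c
    · subst h; simp only [pvRunsAux] at hr; exact ih x (k + 1) (by omega) r hr
    · simp only [pvRunsAux, if_neg h, List.mem_cons] at hr
      rcases hr with hr | hr
      · subst hr; simpa
      · exact ih x 1 le_rfl r hr

theorem pvRuns_pos : ∀ xs : List Char, ∀ r ∈ pvRuns xs, 1 ≤ r.2 := by
  intro xs r hr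
  cases xs with
  | nil => simp [pvRuns] at hr
  | cons x xs => exact pvRunsAux_pos xs x 1 le_rfl r hr

theorem pvFlat_ne_nil (rs : List (Char × Nat)) (h : rs ≠ []) (hpos : ∀ r ∈ rs, 1 ≤ r.2) :
    pvFlat rs ≠ [] := by
  cases rs with
  | nil => exact absurd rfl h
  | cons r rs =>
    have h1 : 1 ≤ r.2 := hpos r (by simp)
    intro hnil
    have hlen := congrArg List.length hnil
    simp [pvFlat] at hlen
    omega

theorem pvFlat_getLast : ∀ rs : List (Char × Nat), (∀ r ∈ rs, 1 ≤ r.2) →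
    (pvFlat rs).getLast? = (rs.getLast?).map Prod.fst := by
  intro rs
  induction rs with
  | nil => intro _; simp [pvFlat]
  | cons r rs ih =>
    intro hpos
    cases hrs : rs with
    | nil =>
      have h1 : 1 ≤ r.2 := hpos r (by simp)
      obtain ⟨m, hm⟩ : ∃ m, r.2 = m + 1 := ⟨r.2 - 1, by omega⟩
      simp only [pvFlat, List.flatMap_cons, List.flatMap_nil, List.append_nil]
      rw [hm, List.replicate_succ', List.getLast?_concat]
      rfl
    | cons r' rs' =>
      subst hrs
      have hne : pvFlat (r' :: rs') ≠ [] :=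
        pvFlat_ne_nil _ (by simp) (fun x hx => hpos x (by simp [hx]))
      simp only [pvFlat, List.flatMap_cons] at hne ⊢
      rw [List.getLast?_append_of_ne_nil _ hne]
      have := ih (fun x hx => hpos x (by simp [hx]))
      simp only [pvFlat, List.flatMap_cons] at this
      rw [this]
      simp

theorem pvPyGet_run (pre : List Char) (c : Char) (sn : Nat) (h : 1 ≤ sn) (rest : List Char) :
    PySem.List.pyGet? (pre ++ (List.replicate sn c ++ rest)) ((pre.length : Int) + (sn : Int) - 1) = some c := by
  have hidx : (pre.length : Int) + (sn : Int) - 1 = ((pre.length + (sn - 1) : Nat) : Int) := by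
    push_cast [h]; omega
  rw [hidx, PySem.List.pyGet?_natCast]
  rw [List.getElem?_append_right (by omega)]
  have : pre.length + (sn - 1) - pre.length = sn - 1 := by omega
  rw [this]
  rw [List.getElem?_append_left (by simp; omega)]
  simp [List.getElem?_replicate]
  omega

theorem pvZipLoop_eq_check : ∀ (rs rt : List (Char × Nat)) (pre preT : List Char),
    rs.length = rt.length → (∀ r ∈ rs, 1 ≤ r.2) → (∀ r ∈ rt, 1 ≤ r.2) →
    pvZipLoop (pre ++ pvFlat rs) (preT ++ pvFlat rt)
      ((rs.map fun r => (r.2 : Int)).zip (rt.map fun r => (r.2 : Int)))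
      (pre.length : Int) (preT.length : Int) = pvCheck rs rt := by
  intro rs
  induction rs with
  | nil =>
    intro rt pre preT hlen _ _
    cases rt with
    | nil => simp [pvZipLoop, pvCheck]
    | cons r rt => simp at hlen
  | cons r rs ih =>
    intro rt pre preT hlen hposS hposT
    cases rt with
    | nil => simp at hlen
    | cons r' rt =>
      obtain ⟨c, sn⟩ := r
      obtain ⟨d, tn⟩ := r'
      have hsn : 1 ≤ sn := hposS (c, sn) (by simp)
      have htn : 1 ≤ tn := hposT (d, tn) (by simp)
      simp only [List.map_cons, List.zip_cons_cons, pvZipLoop, pvCheck]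
      have hfS : pvFlat ((c, sn) :: rs) = List.replicate sn c ++ pvFlat rs := by simp [pvFlat]
      have hfT : pvFlat ((d, tn) :: rt) = List.replicate tn d ++ pvFlat rt := by simp [pvFlat]
      rw [hfS, hfT, pvPyGet_run pre c sn hsn, pvPyGet_run preT d tn htn]
      by_cases hA : ((sn : Int) > (tn : Int) ∨ ((sn : Int) = 1 ∧ (tn : Int) > (sn : Int)) ∨ (some c ≠ some d))
      · rw [if_pos hA, if_pos]
        rcases hA with hh | ⟨h1, h2⟩ | hh
        · right; left; omega
        · right; right; exact ⟨by exact_mod_cast h1, by omega⟩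
        · left; intro he; exact hh (by rw [he])
      · rw [if_neg hA, if_neg]
        · have h1 : pre ++ (List.replicate sn c ++ pvFlat rs) = (pre ++ List.replicate sn c) ++ pvFlat rs := by simp
          have h2 : preT ++ (List.replicate tn d ++ pvFlat rt) = (preT ++ List.replicate tn d) ++ pvFlat rt := by simp
          have h3 : (pre.length : Int) + (sn : Int) = (((pre ++ List.replicate sn c).length : Nat) : Int) := by
            simp
          have h4 : (preT.length : Int) + (tn : Int) = (((preT ++ List.replicate tn d).length : Nat) : Int) := by
            simp
          rw [h1, h2, h3, h4]
          exact ih rt (pre ++ List.replicate sn c) (preT ++ List.replicate tn d)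
            (by simpa using hlen)
            (fun x hx => hposS x (by simp [hx]))
            (fun x hx => hposT x (by simp [hx]))
        · intro h
          apply hA
          rcases h with h | h | ⟨h1, h2⟩
          · right; right; intro he; exact h (Option.some.inj he)
          · left; omega
          · right; left; exact ⟨by exact_mod_cast h1, by omega⟩

theorem pvCheck_no_of_ne : ∀ rs rt, pvCheck rs rt ≠ pvYES → pvCheck rs rt = pvNO := by
  intro rs
  induction rs with
  | nil => intro rt h; cases rt with
    | nil => exact absurd rfl h
    | cons r rt => rfl
  | cons r rs ih =>
    intro rt h
    cases rt with
    | nil => rfl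
    | cons r' rt =>
      obtain ⟨c, s⟩ := r
      obtain ⟨d, t⟩ := r'
      rw [pvCheck] at h ⊢
      split_ifs with hc
      · rfl
      · rw [if_neg hc] at h
        exact ih rt h

theorem pvCheck_yes : ∀ rs rt, pvCheck rs rt = pvYES →
    List.Forall₂ (fun (a b : Char × Nat) => a.1 = b.1 ∧ a.2 ≤ b.2) rs rt := by
  intro rs
  induction rs with
  | nil => intro rt h; cases rt with
    | nil => exact List.Forall₂.nil
    | cons r rt => exact absurd h (by simp [pvCheck, pvNO, pvYES])
  | cons r rs ih =>
    intro rt h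
    cases rt with
    | nil => exact absurd h (by simp [pvCheck, pvNO, pvYES])
    | cons r' rt =>
      obtain ⟨c, s⟩ := r
      obtain ⟨d, t⟩ := r'
      rw [pvCheck] at h
      split_ifs at h with hc
      · exact absurd h (by simp [pvNO, pvYES])
      · rw [not_or, not_or] at hc
        obtain ⟨hc1, hc2, hc3⟩ := hc
        rw [not_not] at hc1
        exact List.Forall₂.cons ⟨hc1, by omega⟩ (ih rt h)

theorem pvForall₂_flat_len_le (rs rt : List (Char × Nat))
    (h : List.Forall₂ (fun (a b : Char × Nat) => a.1 = b.1 ∧ a.2 ≤ b.2) rs rt) :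
    (pvFlat rs).length ≤ (pvFlat rt).length := by
  induction h with
  | nil => exact le_rfl
  | cons hab hrest ih => simp only [pvFlat, List.flatMap_cons, List.length_append, List.length_replicate] at *; omega

theorem pvForall₂_map_fst (rs rt : List (Char × Nat))
    (h : List.Forall₂ (fun (a b : Char × Nat) => a.1 = b.1 ∧ a.2 ≤ b.2) rs rt) :
    rs.map Prod.fst = rt.map Prod.fst := by
  induction h with
  | nil => rfl
  | cons hab hrest ih => simp [hab.1, ih]

-- ===== VERDICT (by name: the statement is the Claim_ definition above) =====
theorem pvRuns_cons (c : Char) (s₀ : List Char) :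
    pvRuns (c :: s₀) = (c, 1 + (pvRun c s₀).1) :: pvRuns (pvRun c s₀).2 := by
  rw [pvRuns, pvRunsAux_eq_run]

theorem solve_spec : Claim_equal_solve := by
  intro S T _ hpre
  unfold Spec_solve solve_alt solve
  have hs : S.toList ≠ [] := by simpa using hpre
  obtain ⟨c, s₀, hS⟩ : ∃ c s₀, S.toList = c :: s₀ := by
    cases h : S.toList with
    | nil => exact absurd h hs
    | cons c s₀ => exact ⟨c, s₀, rfl⟩
  rw [pvScan_eq_check]
  have posS := pvRuns_pos S.toList
  have posT := pvRuns_pos T.toList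
  have hz : (pvRuns S.toList).length = (pvRuns T.toList).length →
      pvZipLoop S.toList T.toList (((pvRL S.toList).1).zip ((pvRL T.toList).1)) 0 0
        = pvCheck (pvRuns S.toList) (pvRuns T.toList) := by
    intro hlen
    rw [pvRL_eq, pvRL_eq]
    have := pvZipLoop_eq_check (pvRuns S.toList) (pvRuns T.toList) [] [] hlen posS posT
    simpa [pvFlat_runs] using this
  by_cases hG1 : (S.toList.length > T.toList.length ∨
      PySem.List.pyGet? S.toList 0 ≠ PySem.List.pyGet? T.toList 0 ∨
      PySem.List.pyGet? S.toList (-1) ≠ PySem.List.pyGet? T.toList (-1))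
  · rw [if_pos hG1, pvCheck_no_of_ne]
    intro hY
    have F₂ := pvCheck_yes _ _ hY
    obtain ⟨d, t₀, hT⟩ : ∃ d t₀, T.toList = d :: t₀ := by
      cases h : T.toList with
      | nil =>
        exfalso
        have hlen := F₂.length_eq
        rw [hS, h, pvRuns_cons] at hlen
        simp [pvRuns] at hlen
      | cons d t₀ => exact ⟨d, t₀, rfl⟩
    have hcd : c = d := by
      have := F₂
      rw [hS, hT, pvRuns_cons, pvRuns_cons] at this
      rcases this with _ | ⟨⟨h1, _⟩, _⟩
      exact h1
    have hlenle : S.toList.length ≤ T.toList.length := by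
      have := pvForall₂_flat_len_le _ _ F₂
      simpa [pvFlat_runs] using this
    have hlast : S.toList.getLast? = T.toList.getLast? := by
      rw [← pvFlat_runs S.toList, ← pvFlat_runs T.toList,
        pvFlat_getLast _ posS, pvFlat_getLast _ posT,
        ← List.getLast?_map, ← List.getLast?_map, pvForall₂_map_fst _ _ F₂]
    rcases hG1 with h | h | h
    · omega
    · rw [hS, hT, PySem.List.pyGet?_zero_cons, PySem.List.pyGet?_zero_cons, hcd] at h
      exact h rfl
    · rw [PySem.List.pyGet?_neg_one, PySem.List.pyGet?_neg_one, hlast] at h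
      exact h rfl
  · rw [if_neg hG1]
    by_cases hG2 : ((pvRL S.toList).1.length ≠ (pvRL T.toList).1.length)
    · rw [if_pos hG2, pvCheck_no_of_ne]
      intro hY
      apply hG2
      rw [pvRL_eq, pvRL_eq]
      simpa using (pvCheck_yes _ _ hY).length_eq
    · rw [if_neg hG2]
      apply hz
      rw [pvRL_eq, pvRL_eq] at hG2
      simpa using not_ne_iff.mp hG2
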